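-- pv_equiv track=rewrite | github.com/njs89/offenseval2019 | svm_utils.py | tweets_to_bow
-- ===== SOURCE A (Python) =====
-- def tweets_to_bow(tweets):
--     """
--     changes tweets into a string of bag of words
--     """
--     bow_list = list()
--     #bow_dict = dict()
--     for tweet in tweets:
--         tweet = tweet.replace("@USER", "USER")
--         bow = tweet.split(" ")
--         bow_string = ""
--         for word in bow:
--             bow_string += word+" "
--         bow_list.append(bow_string)
--     return bow_list
-- ===== SOURCE B (Python) =====
-- def tweets_to_bow(tweets):
--     """
--     changes tweets into a string of bag of words
--     """
--     # split(" ") followed by re-appending each word plus " " just rebuilds the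
--     # (replaced) tweet with one trailing space, so do that directly.
--     return [tweet.replace("@USER", "USER") + " " for tweet in tweets]
-- ===== Notes on version B (the rewrite author's own statement) =====
-- stated objective: simpler
-- what changed: B drops A's tokenize-and-rebuild inner loop: splitting on ' ' and re-appending each word plus ' ' is the identity plus a trailing space, so B maps each tweet to tweet.replace('@USER','USER') + ' ' in one pass.
import Mathlib
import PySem

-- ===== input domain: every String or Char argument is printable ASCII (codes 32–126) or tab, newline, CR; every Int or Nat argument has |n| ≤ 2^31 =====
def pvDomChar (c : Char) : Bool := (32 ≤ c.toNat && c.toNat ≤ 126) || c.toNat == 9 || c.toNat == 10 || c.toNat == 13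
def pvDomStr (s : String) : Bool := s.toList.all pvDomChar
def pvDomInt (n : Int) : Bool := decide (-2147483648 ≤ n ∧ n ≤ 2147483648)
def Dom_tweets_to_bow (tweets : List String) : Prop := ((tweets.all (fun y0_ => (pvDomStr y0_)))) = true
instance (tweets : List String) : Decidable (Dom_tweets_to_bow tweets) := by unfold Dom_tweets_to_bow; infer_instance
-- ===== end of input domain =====

-- B replaces A's split-then-rebuild inner loop by the closed form `replace tweet ++ " "` (objective: simpler).

-- ===== PORT A =====
def tweets_to_bow (tweets : List String) : List String :=
  tweets.foldl (fun bow_list tweet =>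
    let tweet := PySem.Str.replace tweet "@USER" "USER"
    -- sep " " is a nonempty literal, so Python's split never raises; split? is always `some`
    let bow := (PySem.Str.split? tweet " ").getD []
    let bow_string := bow.foldl (fun bow_string word => bow_string ++ word ++ " ") ""
    bow_list ++ [bow_string]) []

-- ===== PORT B =====
def tweets_to_bow_alt (tweets : List String) : List String :=
  tweets.map (fun tweet => PySem.Str.replace tweet "@USER" "USER" ++ " ")

-- ===== PRECONDITION & SPEC =====
def Spec_tweets_to_bow (tweets : List String) (out : List String) : Prop := out = tweets_to_bow_alt tweets
instance (tweets : List String) (out : List String) : Decidable (Spec_tweets_to_bow tweets out) := by unfold Spec_tweets_to_bow; infer_instance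

-- ===== CLAIM (what is proved, stated in full; the proofs are below) =====
def Claim_equal_tweets_to_bow : Prop := ∀ (tweets : List String), Dom_tweets_to_bow tweets → Spec_tweets_to_bow tweets (tweets_to_bow tweets)

-- ===== LEMMAS AND PROOFS =====

-- Each chunk produced by splitOn, with sep re-appended after it, flattens back to the input plus one trailing sep.
theorem pv_go_flat (sep : List Char) (hsep : sep ≠ []) :
    ∀ (fuel : Nat) (l cur : List Char) (acc : List (List Char)), l.length ≤ fuel →
      ((PySem.Chars.splitOn.go sep fuel l cur acc).map (· ++ sep)).flatten
        = ((acc.reverse.map (· ++ sep)).flatten) ++ cur.reverse ++ l ++ sep := by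
  intro fuel
  induction fuel with
  | zero =>
    intro l cur acc hl
    have hl0 : l = [] := List.length_eq_zero_iff.mp (Nat.le_zero.mp hl)
    subst hl0
    simp [PySem.Chars.splitOn.go]
  | succ n ih =>
    intro l cur acc hl
    cases l with
    | nil => simp [PySem.Chars.splitOn.go]
    | cons c rest =>
      by_cases hpre : sep.isPrefixOf (c :: rest) = true
      · have hdrop : sep ++ (c :: rest).drop sep.length = c :: rest := by
          exact List.prefix_iff_eq_append.mp (List.isPrefixOf_iff_prefix.mp hpre)
        have hlen : ((c :: rest).drop sep.length).length ≤ n := by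
          have hslen : 1 ≤ sep.length := by
            cases sep with
            | nil => exact absurd rfl hsep
            | cons a b => simp
          simp only [List.length_drop]
          omega
        have := ih ((c :: rest).drop sep.length) [] (cur.reverse :: acc) hlen
        simp only [PySem.Chars.splitOn.go, hpre, if_true] at *
        rw [this]
        simp only [List.reverse_cons, List.map_append, List.flatten_append]
        have : cur.reverse ++ sep ++ (c :: rest).drop sep.length = cur.reverse ++ (c :: rest) := by
          rw [List.append_assoc, hdrop]
        simp [this]
      · have hlen : rest.length ≤ n := by
          simp only [List.length_cons] at hl; omega
        have := ih rest (c :: cur) acc hlen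
        simp only [PySem.Chars.splitOn.go, hpre] at *
        rw [if_neg (by simp), this]
        simp

theorem pv_splitOn_flat (s sep : List Char) (hsep : sep ≠ []) :
    ((PySem.Chars.splitOn s sep).map (· ++ sep)).flatten = s ++ sep := by
  have := pv_go_flat sep hsep (s.length + 1) s [] [] (by omega)
  simpa [PySem.Chars.splitOn] using this

-- The inner rebuild loop, at the level of char lists.
theorem pv_foldl_flat (sep : List Char) :
    ∀ (ps : List (List Char)) (x : List Char),
      ps.foldl (fun a b => a ++ b ++ sep) x = x ++ (ps.map (· ++ sep)).flatten := by
  intro ps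
  induction ps with
  | nil => intro x; simp
  | cons p rest ih =>
    intro x
    simp only [List.foldl_cons, ih, List.map_cons, List.flatten_cons]
    simp

-- Transport the inner String foldl to char lists.
theorem pv_foldl_toList (ps : List (List Char)) (x : String) :
    ((ps.map String.ofList).foldl (fun (a : String) b => a ++ b ++ " ") x).toList
      = ps.foldl (fun a b => a ++ b ++ [' ']) x.toList := by
  induction ps generalizing x with
  | nil => simp
  | cons p rest ih =>
    simp only [List.map_cons, List.foldl_cons, ih]
    congr 1
    simp

-- One tweet: A's rebuild of the split equals the tweet plus a trailing space.
theorem pv_one_tweet (t : String) :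
    (((PySem.Str.split? t " ").getD []).foldl
        (fun (bow_string : String) word => bow_string ++ word ++ " ") "")
      = t ++ " " := by
  apply String.toList_inj.mp
  have hsplit : PySem.Str.split? t " " =
      some ((PySem.Chars.splitOn t.toList [' ']).map String.ofList) := by
    simp [PySem.Str.split?, PySem.Chars.split?]
  rw [hsplit]
  simp only [Option.getD_some]
  rw [pv_foldl_toList]
  have h1 := pv_foldl_flat [' '] (PySem.Chars.splitOn t.toList [' ']) ("".toList)
  rw [h1, pv_splitOn_flat t.toList [' '] (by simp)]
  simp

-- The outer append loop is a map.
theorem pv_foldl_append_map (f : String → String) :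
    ∀ (ts : List String) (init : List String),
      ts.foldl (fun l t => l ++ [f t]) init = init ++ ts.map f := by
  intro ts
  induction ts with
  | nil => intro init; simp
  | cons t rest ih =>
    intro init
    simp [List.foldl_cons, ih]

-- ===== VERDICT (by name: the statement is the Claim_ definition above) =====
theorem tweets_to_bow_spec : Claim_equal_tweets_to_bow := by
  intro tweets _
  unfold Spec_tweets_to_bow tweets_to_bow tweets_to_bow_alt
  rw [pv_foldl_append_map (fun tweet =>
      (((PySem.Str.split? (PySem.Str.replace tweet "@USER" "USER") " ").getD []).foldl
        (fun (bow_string : String) word => bow_string ++ word ++ " ") "")) tweets []]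
  simp only [List.nil_append]
  apply List.map_congr_left
  intro t _
  exact pv_one_tweet (PySem.Str.replace t "@USER" "USER")
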